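-- pv_equiv track=rewrite | github.com/daniel-reich/ubiquitous-fiesta | 8qD23E6XRMaWhyJ5z_13.py | happiness_number
-- ===== SOURCE A (Python) =====
-- def happiness_number(s):
--   total = 0
--   d = len(s)
--   for i in range(d):
--       if ':)' in s[i:i+2]:
--           total += 1
--       elif ':(' in s[i:i+2]:
--           total -= 1
--       elif '):' in s[i:i+2]:
--           total -= 1
--       elif '(:' in s[i:i+2]:
--           total += 1
--   return total
-- ===== SOURCE B (Python) =====
-- def happiness_number(s):
--   return s.count(':)') + s.count('(:') - s.count(':(') - s.count('):')
-- ===== Notes on version B (the rewrite author's own statement) =====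
-- stated objective: faster
-- what changed: Replaced the per-index loop that slices a 2-char window and walks an if/elif chain by a closed arithmetic combination of four whole-string substring counts (s.count), valid because each 2-char pattern has distinct characters so it cannot self-overlap and the four patterns are mutually exclusive at any position.
import Mathlib
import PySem

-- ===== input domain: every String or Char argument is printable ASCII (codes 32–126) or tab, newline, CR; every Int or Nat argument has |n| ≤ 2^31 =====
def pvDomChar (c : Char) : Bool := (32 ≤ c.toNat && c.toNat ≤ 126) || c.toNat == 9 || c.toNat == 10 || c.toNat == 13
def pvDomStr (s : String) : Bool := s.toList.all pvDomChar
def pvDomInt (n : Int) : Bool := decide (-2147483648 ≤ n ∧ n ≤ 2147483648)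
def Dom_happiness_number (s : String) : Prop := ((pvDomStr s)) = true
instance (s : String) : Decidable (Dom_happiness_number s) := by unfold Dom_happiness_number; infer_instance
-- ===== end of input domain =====

-- B replaces A's per-index window loop by a sum/difference of four whole-string substring counts (measured constant-factor faster in Python).
-- ===== PORT A =====
def happiness_number (s : String) : Int :=
  let d : Int := PySem.Str.len s
  (PySem.List.pyRange 0 d 1).foldl (fun total i =>
    let w := PySem.Str.slice s (some i) (some (i + 2))
    if PySem.Str.isIn ":)" w then total + 1
    else if PySem.Str.isIn ":(" w then total - 1
    else if PySem.Str.isIn "):" w then total - 1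
    else if PySem.Str.isIn "(:" w then total + 1
    else total) 0

-- ===== PORT B =====
def happiness_number_alt (s : String) : Int :=
  (PySem.Str.count s ":)" : Int) + (PySem.Str.count s "(:" : Int)
    - (PySem.Str.count s ":(" : Int) - (PySem.Str.count s "):" : Int)

-- ===== PRECONDITION & SPEC =====
def Spec_happiness_number (s : String) (out : Int) : Prop := out = happiness_number_alt s
instance (s : String) (out : Int) : Decidable (Spec_happiness_number s out) := by unfold Spec_happiness_number; infer_instance

-- ===== CLAIM (what is proved, stated in full; the proofs are below) =====
def Claim_equal_happiness_number : Prop := ∀ (s : String), Dom_happiness_number s → Spec_happiness_number s (happiness_number s)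

-- ===== LEMMAS AND PROOFS =====

/-- number of indices i with l[i] = a and l[i+1] = b -/
def pcN (a b : Char) : List Char → Nat
  | [] => 0
  | [_] => 0
  | x :: y :: t => (if x = a ∧ y = b then 1 else 0) + pcN a b (y :: t)

/-- additive value of one window of A's loop -/
def wval (w : List Char) : Int :=
  if PySem.Chars.isIn [':', ')'] w then 1
  else if PySem.Chars.isIn [':', '('] w then -1
  else if PySem.Chars.isIn [')', ':'] w then -1
  else if PySem.Chars.isIn ['(', ':'] w then 1
  else 0

/-- total of A's loop as a structural recursion over the char list -/
def scoreL : List Char → Int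
  | [] => 0
  | x :: t => wval ((x :: t).take 2) + scoreL t

theorem isIn_pair (a b x y : Char) :
    PySem.Chars.isIn [a, b] [x, y] = true ↔ (x = a ∧ y = b) := by
  rw [PySem.Chars.isIn_iff_infix]
  constructor
  · intro h
    have := h.sublist.eq_of_length (by simp)
    simp at this
    exact ⟨this.1.symm, this.2.symm⟩
  · rintro ⟨rfl, rfl⟩; exact List.infix_refl _

theorem isIn_single (a b x : Char) :
    PySem.Chars.isIn [a, b] [x] = false := by
  rw [PySem.Chars.isIn_eq_false_iff]
  intro h
  have := h.sublist.length_le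
  simp at this

theorem pcN_nomatch (a b y : Char) (hby : y ≠ a) (t : List Char) :
    pcN a b (y :: t) = pcN a b t := by
  cases t with
  | nil => simp [pcN]
  | cons z v =>
    simp only [pcN]
    rw [if_neg (fun h => hby h.1)]
    omega

theorem count_go_eq (a b : Char) (hab : a ≠ b) :
    ∀ (fuel : Nat) (l : List Char) (acc : Nat), l.length ≤ fuel →
      PySem.Chars.count.go [a, b] fuel l acc = acc + pcN a b l := by
  intro fuel
  induction fuel with
  | zero =>
    intro l acc h
    cases l with
    | nil => simp [PySem.Chars.count.go, pcN]
    | cons x t => simp at h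
  | succ n ih =>
    intro l acc h
    cases l with
    | nil => simp [PySem.Chars.count.go, pcN]
    | cons x t =>
      cases t with
      | nil =>
        simp only [PySem.Chars.count.go, List.isPrefixOf, Bool.and_false, Bool.false_eq_true,
          if_false, pcN, Nat.add_zero]
        rw [ih [] acc (by simp)]
        simp [pcN]
      | cons y u =>
        by_cases hm : x = a ∧ y = b
        · obtain ⟨rfl, rfl⟩ := hm
          have hpre : List.isPrefixOf [x, y] (x :: y :: u) = true := by
            simp [List.isPrefixOf]
          simp only [PySem.Chars.count.go, hpre, if_true, List.length_cons, List.drop_succ_cons,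
            List.length_nil, List.drop_zero]
          rw [ih u (acc + 1) (by simp at h ⊢; omega)]
          rw [show pcN x y (x :: y :: u) = 1 + pcN x y (y :: u) by simp [pcN]]
          rw [pcN_nomatch x y y (Ne.symm hab) u]
          omega
        · have hpre : List.isPrefixOf [a, b] (x :: y :: u) = false := by
            by_contra hc
            simp [List.isPrefixOf] at hc
            exact hm ⟨hc.1.symm, hc.2.symm⟩
          simp only [PySem.Chars.count.go, hpre, Bool.false_eq_true, if_false]
          rw [ih (y :: u) acc (by simp at h ⊢; omega)]
          rw [show pcN a b (x :: y :: u) = 0 + pcN a b (y :: u) by simp [pcN, hm]]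
          omega

theorem count_eq_pcN (a b : Char) (hab : a ≠ b) (cs : List Char) :
    PySem.Chars.count cs [a, b] = pcN a b cs := by
  simp [PySem.Chars.count]
  simpa using count_go_eq a b hab cs.length cs 0 le_rfl

theorem scoreL_eq (l : List Char) :
    scoreL l = (pcN ':' ')' l : Int) + (pcN '(' ':' l : Int)
      - (pcN ':' '(' l : Int) - (pcN ')' ':' l : Int) := by
  induction l with
  | nil => simp [scoreL, pcN]
  | cons x t ih =>
    cases t with
    | nil => simp [scoreL, wval, isIn_single, pcN]
    | cons y u =>
      have hs : scoreL (x :: y :: u) = wval [x, y] + scoreL (y :: u) := rfl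
      rw [hs, ih]
      simp only [pcN]
      by_cases h1 : x = ':' ∧ y = ')'
      · obtain ⟨rfl, rfl⟩ := h1
        rw [show wval [':', ')'] = 1 from by decide]
        norm_num
        ring
      · by_cases h2 : x = ':' ∧ y = '('
        · obtain ⟨rfl, rfl⟩ := h2
          rw [show wval [':', '('] = -1 from by decide]
          norm_num
          ring
        · by_cases h3 : x = ')' ∧ y = ':'
          · obtain ⟨rfl, rfl⟩ := h3
            rw [show wval [')', ':'] = -1 from by decide]
            norm_num
            ring
          · by_cases h4 : x = '(' ∧ y = ':'
            · obtain ⟨rfl, rfl⟩ := h4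
              rw [show wval ['(', ':'] = 1 from by decide]
              norm_num
              ring
            · have e1 : PySem.Chars.isIn [':', ')'] [x, y] = false := by
                cases hb : PySem.Chars.isIn [':', ')'] [x, y] with
                | false => rfl
                | true => exact absurd ((isIn_pair _ _ _ _).mp hb) h1
              have e2 : PySem.Chars.isIn [':', '('] [x, y] = false := by
                cases hb : PySem.Chars.isIn [':', '('] [x, y] with
                | false => rfl
                | true => exact absurd ((isIn_pair _ _ _ _).mp hb) h2
              have e3 : PySem.Chars.isIn [')', ':'] [x, y] = false := by
                cases hb : PySem.Chars.isIn [')', ':'] [x, y] with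
                | false => rfl
                | true => exact absurd ((isIn_pair _ _ _ _).mp hb) h3
              have e4 : PySem.Chars.isIn ['(', ':'] [x, y] = false := by
                cases hb : PySem.Chars.isIn ['(', ':'] [x, y] with
                | false => rfl
                | true => exact absurd ((isIn_pair _ _ _ _).mp hb) h4
              rw [show wval [x, y] = 0 from by simp [wval, e1, e2, e3, e4]]
              rw [if_neg h1, if_neg h2, if_neg h3, if_neg h4]
              push_cast
              ring

theorem loopA_gen (s : String) :
    ∀ (n k : Nat) (acc : Int), s.toList.length - k = n →
    (PySem.List.pyRange (k : Int) (PySem.Str.len s) 1).foldl (fun total i =>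
      let w := PySem.Str.slice s (some i) (some (i + 2))
      if PySem.Str.isIn ":)" w then total + 1
      else if PySem.Str.isIn ":(" w then total - 1
      else if PySem.Str.isIn "):" w then total - 1
      else if PySem.Str.isIn "(:" w then total + 1
      else total) acc = acc + scoreL (s.toList.drop k) := by
  intro n
  induction n with
  | zero =>
    intro k acc h
    have hk : s.toList.length ≤ k := by omega
    have hr : PySem.List.pyRange (k : Int) (PySem.Str.len s) 1 = [] := by
      rw [PySem.Str.len_eq, PySem.List.pyRange_one]
      have : ((s.toList.length : Int) - (k : Int)).toNat = 0 := by omega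
      rw [this]
      simp
    rw [hr, List.drop_eq_nil_of_le hk]
    simp [scoreL]
  | succ n ihn =>
    intro k acc h
    have hk : k < s.toList.length := by omega
    have hlt : (k : Int) < PySem.Str.len s := by
      rw [PySem.Str.len_eq]; exact_mod_cast hk
    rw [PySem.List.pyRange_one_cons hlt, List.foldl_cons]
    have hcast : ((k : Int) + 1) = ((k + 1 : Nat) : Int) := by push_cast; ring
    rw [hcast, ihn (k + 1) _ (by omega)]
    -- evaluate the body at index k
    have hw : ∀ (p : String), PySem.Str.isIn p (PySem.Str.slice s (some (k : Int)) (some ((k : Int) + 2)))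
        = PySem.Chars.isIn p.toList ((s.toList.drop k).take 2) := by
      intro p
      rw [PySem.Str.isIn_eq, PySem.Str.toList_slice, PySem.Chars.slice_eq_listSlice]
      rw [show ((k : Int) + 2) = ((k : Int) + ((2 : Nat) : Int)) from by norm_num]
      rw [PySem.List.slice_natCast_add]
    have hdrop : s.toList.drop k = s.toList[k] :: s.toList.drop (k + 1) :=
      List.drop_eq_getElem_cons hk
    have hsc : scoreL (s.toList.drop k)
        = wval ((s.toList.drop k).take 2) + scoreL (s.toList.drop (k + 1)) := by
      rw [hdrop]
      rfl
    simp only [hw]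
    rw [hsc]
    unfold wval
    rw [show (":)" : String).toList = [':', ')'] from rfl,
      show (":(" : String).toList = [':', '('] from rfl,
      show ("):" : String).toList = [')', ':'] from rfl,
      show ("(:" : String).toList = ['(', ':'] from rfl]
    split_ifs <;> ring

theorem loopA (s : String) (k : Nat) (acc : Int) :
    (PySem.List.pyRange (k : Int) (PySem.Str.len s) 1).foldl (fun total i =>
      let w := PySem.Str.slice s (some i) (some (i + 2))
      if PySem.Str.isIn ":)" w then total + 1
      else if PySem.Str.isIn ":(" w then total - 1
      else if PySem.Str.isIn "):" w then total - 1
      else if PySem.Str.isIn "(:" w then total + 1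
      else total) acc = acc + scoreL (s.toList.drop k) :=
  loopA_gen s (s.toList.length - k) k acc rfl

-- ===== VERDICT (by name: the statement is the Claim_ definition above) =====
theorem happiness_number_spec : Claim_equal_happiness_number := by
  intro s _
  unfold Spec_happiness_number happiness_number happiness_number_alt
  have h := loopA s 0 0
  simp only [Nat.cast_zero] at h
  rw [h]
  simp only [List.drop_zero, scoreL_eq]
  simp only [PySem.Str.count, show (":)" : String).toList = [':', ')'] from rfl,
    show ("(:" : String).toList = ['(', ':'] from rfl,
    show (":(" : String).toList = [':', '('] from rfl,
    show ("):" : String).toList = [')', ':'] from rfl]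
  rw [count_eq_pcN ':' ')' (by decide), count_eq_pcN '(' ':' (by decide),
    count_eq_pcN ':' '(' (by decide), count_eq_pcN ')' ':' (by decide)]
  ring
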